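-- pv_equiv track=rewrite | github.com/cbobed/PattyImplementation | utils.py | detype
-- ===== SOURCE A (Python) =====
-- def is_entity(word):
--     return word in ["<ORG>", "<LOC>", "<PER>", "<MISC>", "<GPE>", "<MONEY>", "<DNI>", "<ENTITY>", "<NUM>"]
--
-- def detype(pat):
--     words = pat.split(" ")
--     strret = list()
--     for w in words:
--         if is_entity(w):
--             strret.append("<ENTITY>")
--         else:
--             strret.append(w)
--     strret = ' '.join(strret)
--     return strret
-- ===== SOURCE B (Python) =====
-- ENTITY_TOKENS = frozenset(
--     ["<ORG>", "<LOC>", "<PER>", "<MISC>", "<GPE>", "<MONEY>", "<DNI>", "<ENTITY>", "<NUM>"]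
-- )
--
-- def detype(pat):
--     # Single character-level pass: collect each space-delimited chunk,
--     # emit it (normalised to <ENTITY> if it is an entity token) as we go.
--     out = []
--     word = []
--     for ch in pat:
--         if ch == ' ':
--             w = ''.join(word)
--             out.append('<ENTITY>' if w in ENTITY_TOKENS else w)
--             out.append(' ')
--             word = []
--         else:
--             word.append(ch)
--     w = ''.join(word)
--     out.append('<ENTITY>' if w in ENTITY_TOKENS else w)
--     return ''.join(out)
-- ===== Notes on version B (the rewrite author's own statement) =====
-- stated objective: alternative
-- what changed: Replaces A's split-into-list / map / join pipeline with a single character-level scan that accumulates the current space-delimited chunk and emits it (normalised to <ENTITY> when it is an entity token) as it goes, never materialising the word list.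
import Mathlib
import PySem

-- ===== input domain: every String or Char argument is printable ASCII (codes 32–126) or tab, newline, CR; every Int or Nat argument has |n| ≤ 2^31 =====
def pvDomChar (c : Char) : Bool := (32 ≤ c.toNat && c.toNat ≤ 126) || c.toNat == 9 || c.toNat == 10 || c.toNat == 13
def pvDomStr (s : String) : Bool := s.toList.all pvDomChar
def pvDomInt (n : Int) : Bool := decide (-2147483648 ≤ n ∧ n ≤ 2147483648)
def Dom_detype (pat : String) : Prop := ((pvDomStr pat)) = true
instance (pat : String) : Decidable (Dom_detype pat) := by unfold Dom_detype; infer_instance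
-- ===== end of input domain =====

-- B replaces A's split/map/join pipeline with a single character-level scan; objective: alternative (same cost).

-- ===== PORT A =====
def is_entity (word : String) : Bool :=
  ["<ORG>", "<LOC>", "<PER>", "<MISC>", "<GPE>", "<MONEY>", "<DNI>", "<ENTITY>", "<NUM>"].contains word

def detype (pat : String) : String :=
  -- words = pat.split(" ")  (separator is non-empty, so split? never returns none)
  let words := (PySem.Str.split? pat " ").getD []
  -- for w in words: append "<ENTITY>" or w
  let strret := words.foldl (fun acc w => if is_entity w then acc ++ ["<ENTITY>"] else acc ++ [w]) []
  -- ' '.join(strret)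
  PySem.Str.join " " strret

-- ===== PORT B =====
def detype_altTokens : PySem.Set String :=
  PySem.Set.ofList ["<ORG>", "<LOC>", "<PER>", "<MISC>", "<GPE>", "<MONEY>", "<DNI>", "<ENTITY>", "<NUM>"]

-- w = ''.join(word);  '<ENTITY>' if w in ENTITY_TOKENS else w
def detype_altEmit (word : List Char) : String :=
  let w := String.ofList word
  if PySem.Set.contains detype_altTokens w then "<ENTITY>" else w

-- the for-loop over the characters of pat, with the `word` chunk accumulator (chars pushed in front,
-- reversed when the chunk is emitted) and the `out` list of emitted pieces
def detype_altGo : List Char → List Char → List String → List String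
  | [], word, out => out ++ [detype_altEmit word.reverse]
  | c :: rest, word, out =>
      if c = ' ' then detype_altGo rest [] (out ++ [detype_altEmit word.reverse, " "])
      else detype_altGo rest (c :: word) out

def detype_alt (pat : String) : String :=
  PySem.Str.join "" (detype_altGo pat.toList [] [])

-- ===== PRECONDITION & SPEC =====
def Spec_detype (pat : String) (out : String) : Prop := out = detype_alt pat
instance (pat : String) (out : String) : Decidable (Spec_detype pat out) := by unfold Spec_detype; infer_instance

-- ===== CLAIM (what is proved, stated in full; the proofs are below) =====
def Claim_equal_detype : Prop := ∀ (pat : String), Dom_detype pat → Spec_detype pat (detype pat)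

-- ===== LEMMAS AND PROOFS =====

-- the nine entity tokens, on the char-list side
def entLists : List (List Char) :=
  ["<ORG>".toList, "<LOC>".toList, "<PER>".toList, "<MISC>".toList, "<GPE>".toList,
   "<MONEY>".toList, "<DNI>".toList, "<ENTITY>".toList, "<NUM>".toList]

-- reference: split a char list on single spaces (what pat.split(" ") computes)
def refSplit : List Char → List (List Char)
  | [] => [[]]
  | c :: r =>
      if c = ' ' then [] :: refSplit r
      else match refSplit r with
        | [] => [[c]]
        | p :: ps => (c :: p) :: ps

-- reference word map
def eWord (p : List Char) : List Char :=
  if entLists.contains p then "<ENTITY>".toList else p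

lemma refSplit_ne_nil (l : List Char) : refSplit l ≠ [] := by
  cases l with
  | nil => simp [refSplit]
  | cons c r =>
      simp only [refSplit]
      split_ifs
      · simp
      · cases h : refSplit r <;> simp

lemma beq_ofList (p : List Char) (s : String) : (String.ofList p == s) = (p == s.toList) := by
  rw [Bool.eq_iff_iff]
  simp only [beq_iff_eq]
  rw [← String.toList_inj]
  simp

lemma join_empty_sep (ps : List (List Char)) : PySem.Chars.join [] ps = ps.flatten := by
  induction ps with
  | nil => simp [PySem.Chars.join_nil]
  | cons p rest ih =>
      cases rest with
      | nil => simp [PySem.Chars.join_singleton]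
      | cons q r => rw [PySem.Chars.join_cons_cons]; simp at ih ⊢; simp [ih]

lemma sp_toList : (" " : String).toList = [' '] := by decide

lemma isEntity_ofList (p : List Char) : is_entity (String.ofList p) = entLists.contains p := by
  simp only [is_entity, entLists, List.contains_cons, List.contains_nil, beq_ofList]

lemma emit_toList (w : List Char) : (detype_altEmit w).toList = eWord w := by
  unfold detype_altEmit eWord
  have h : PySem.Set.contains detype_altTokens (String.ofList w) = entLists.contains w := by
    rw [PySem.Set.contains_eq_listContains]
    have ht : detype_altTokens =
        ["<ORG>", "<LOC>", "<PER>", "<MISC>", "<GPE>", "<MONEY>", "<DNI>", "<ENTITY>", "<NUM>"] := by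
      decide
    rw [ht]
    simp only [entLists, List.contains_cons, List.contains_nil, beq_ofList]
  simp only [h]
  split_ifs <;> simp

-- characterisation of PySem's fuel-based splitOn.go for the single-space separator
lemma splitOn_go_spec (fuel : ℕ) :
    ∀ (l cur : List Char) (accs : List (List Char)) (p : List Char) (ps : List (List Char)),
      l.length < fuel → refSplit l = p :: ps →
      PySem.Chars.splitOn.go [' '] fuel l cur accs = accs.reverse ++ (cur.reverse ++ p) :: ps := by
  induction fuel with
  | zero => intro l cur accs p ps hl hr; omega
  | succ f ih =>
    intro l cur accs p ps hl hr
    cases l with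
    | nil =>
        simp only [refSplit, List.cons.injEq] at hr
        obtain ⟨rfl, rfl⟩ := hr
        simp [PySem.Chars.splitOn.go]
    | cons c rest =>
        by_cases hc : c = ' '
        · subst hc
          simp only [refSplit, if_true] at hr
          obtain ⟨rfl, rfl⟩ := hr
          obtain ⟨q, qs, hq⟩ : ∃ q qs, refSplit rest = q :: qs := by
            cases h : refSplit rest with
            | nil => exact absurd h (refSplit_ne_nil rest)
            | cons q qs => exact ⟨q, qs, rfl⟩
          have hpre : List.isPrefixOf [' '] (' ' :: rest) = true := by
            simp [List.isPrefixOf]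
          rw [PySem.Chars.splitOn.go]
          simp only [hpre, if_pos]
          rw [show List.drop [' '].length (' ' :: rest) = rest from rfl]
          rw [ih rest [] (cur.reverse :: accs) q qs (by simpa using Nat.lt_of_succ_lt_succ (by simpa using hl)) hq, hq]
          simp
        · have hq' : ∃ q qs, refSplit rest = q :: qs := by
            cases h : refSplit rest with
            | nil => exact absurd h (refSplit_ne_nil rest)
            | cons q qs => exact ⟨q, qs, rfl⟩
          obtain ⟨q, qs, hq⟩ := hq'
          simp only [refSplit, if_neg hc, hq, List.cons.injEq] at hr
          obtain ⟨rfl, rfl⟩ := hr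
          have hpre : List.isPrefixOf [' '] (c :: rest) = false := by
            simp [List.isPrefixOf]
            intro h; exact absurd h.symm hc
          rw [PySem.Chars.splitOn.go]
          simp only [hpre, Bool.false_eq_true, if_false]
          rw [ih rest (c :: cur) accs q qs (by simpa using Nat.lt_of_succ_lt_succ (by simpa using hl)) hq]
          simp

lemma splitOn_space (s : List Char) : PySem.Chars.splitOn s [' '] = refSplit s := by
  obtain ⟨p, ps, h⟩ : ∃ p ps, refSplit s = p :: ps := by
    cases hr : refSplit s with
    | nil => exact absurd hr (refSplit_ne_nil s)
    | cons p ps => exact ⟨p, ps, rfl⟩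
  rw [PySem.Chars.splitOn, splitOn_go_spec (s.length + 1) s [] [] p ps (by omega) h, h]
  simp

lemma foldl_app (ws : List String) (acc : List String) :
    ws.foldl (fun acc w => if is_entity w then acc ++ ["<ENTITY>"] else acc ++ [w]) acc
      = acc ++ ws.map (fun w => if is_entity w then "<ENTITY>" else w) := by
  induction ws generalizing acc with
  | nil => simp
  | cons w rest ih => simp only [List.foldl_cons, List.map_cons]; split_ifs <;> simp [ih]

lemma detype_toList (pat : String) :
    (detype pat).toList = PySem.Chars.join [' '] ((refSplit pat.toList).map eWord) := by
  unfold detype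
  rw [PySem.Str.split?]
  simp only [sp_toList, PySem.Chars.split?, List.isEmpty_cons, Bool.false_eq_true, if_false,
    Option.map_some, Option.getD_some, splitOn_space, foldl_app, List.nil_append,
    PySem.Str.toList_join, List.map_map]
  congr 1
  apply List.map_congr_left
  intro p _
  simp only [Function.comp_apply, isEntity_ofList, eWord]
  split_ifs <;> simp

lemma altGo_spec (l : List Char) :
    ∀ (word : List Char) (out : List String) (p : List Char) (ps : List (List Char)),
      refSplit l = p :: ps →
      ((detype_altGo l word out).map String.toList).flatten
        = (out.map String.toList).flatten
            ++ PySem.Chars.join [' '] (eWord (word.reverse ++ p) :: ps.map eWord) := by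
  induction l with
  | nil =>
      intro word out p ps hr
      simp only [refSplit, List.cons.injEq] at hr
      obtain ⟨rfl, rfl⟩ := hr
      simp [detype_altGo, emit_toList, PySem.Chars.join_singleton]
  | cons c rest ih =>
      intro word out p ps hr
      obtain ⟨q, qs, hq⟩ : ∃ q qs, refSplit rest = q :: qs := by
        cases h : refSplit rest with
        | nil => exact absurd h (refSplit_ne_nil rest)
        | cons q qs => exact ⟨q, qs, rfl⟩
      by_cases hc : c = ' '
      · subst hc
        simp only [refSplit, if_true] at hr
        obtain ⟨rfl, rfl⟩ := hr
        simp only [detype_altGo, if_true]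
        rw [ih [] (out ++ [detype_altEmit word.reverse, " "]) q qs hq, hq,
          List.map_cons, PySem.Chars.join_cons_cons]
        simp [emit_toList, sp_toList]
      · simp only [refSplit, if_neg hc, hq, List.cons.injEq] at hr
        obtain ⟨rfl, rfl⟩ := hr
        simp only [detype_altGo, if_neg hc]
        rw [ih (c :: word) out q qs hq]
        simp

lemma detype_alt_toList (pat : String) :
    (detype_alt pat).toList = PySem.Chars.join [' '] ((refSplit pat.toList).map eWord) := by
  obtain ⟨p, ps, h⟩ : ∃ p ps, refSplit pat.toList = p :: ps := by
    cases hr : refSplit pat.toList with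
    | nil => exact absurd hr (refSplit_ne_nil _)
    | cons p ps => exact ⟨p, ps, rfl⟩
  unfold detype_alt
  rw [PySem.Str.toList_join]
  have he : ("" : String).toList = [] := by decide
  rw [he, join_empty_sep, altGo_spec pat.toList [] [] p ps h, h]
  simp

-- ===== VERDICT (by name: the statement is the Claim_ definition above) =====
theorem detype_spec : Claim_equal_detype := by
  intro pat _
  show detype pat = detype_alt pat
  rw [← String.toList_inj, detype_toList, detype_alt_toList]
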